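-- pv_equiv track=rewrite | github.com/SyLi9527/ReimplementationOfTwoPapers | codes/MobilityPrediction/LoPpercom/GenericLoP.py | get_N_RL
-- ===== SOURCE A (Python) =====
-- def get_N_RL(sym_list):
--     """
--     Compute a value denoting the maximum "number of reachable locations", ($N_{r}$), over all possible locations.
--
--     From the paper:
--     Formally $N_{r}$ is calculated from an empirical symbolic time series $\mathcal{T} = \{s_{1}, s_{2}, \ldots, s_{m}\}$,
--     with the set of all possible spatial locations being $\Omega$, as $N_{r} = \max_{x \in \Omega} | \{ s_{i+1} : s_i = x \} |$.
--
--     :param sym_list: A list of location symbols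
--     :type sym_list: list
--     """
--
--     mapLocation = {}
--     ct_point = 0
--     for point in sym_list[:-1]:
--         idNextPoint = sym_list[ct_point+1]
--         try:
--             mapLocation[point].add(idNextPoint)
--         except KeyError:
--             mapLocation[point] = set([idNextPoint])
--         ct_point += 1
--     N = 0
--     for SetPoint in mapLocation.values():
--         nb = len(SetPoint)
--         if nb > N:
--             N = nb
--     return N
-- ===== SOURCE B (Python) =====
-- def get_N_RL(sym_list):
--     # Sort the source components of the distinct transition pairs; equal sources
--     # become adjacent, so the answer is the longest run of equal values.
--     srcs = sorted(x for x, _ in set(zip(sym_list, sym_list[1:])))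
--     best = run = 0
--     prev = None
--     for x in srcs:
--         run = run + 1 if x == prev else 1
--         if run > best:
--             best = run
--         prev = x
--     return best
-- ===== Notes on version B (the rewrite author's own statement) =====
-- stated objective: alternative
-- what changed: B replaces A's incrementally built dict-of-successor-sets (maintained with a manual running index) by sort-then-scan: it sorts the source components of the distinct transition pairs so equal sources become adjacent, then returns the longest run of equal values in one linear sweep.
import Mathlib
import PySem

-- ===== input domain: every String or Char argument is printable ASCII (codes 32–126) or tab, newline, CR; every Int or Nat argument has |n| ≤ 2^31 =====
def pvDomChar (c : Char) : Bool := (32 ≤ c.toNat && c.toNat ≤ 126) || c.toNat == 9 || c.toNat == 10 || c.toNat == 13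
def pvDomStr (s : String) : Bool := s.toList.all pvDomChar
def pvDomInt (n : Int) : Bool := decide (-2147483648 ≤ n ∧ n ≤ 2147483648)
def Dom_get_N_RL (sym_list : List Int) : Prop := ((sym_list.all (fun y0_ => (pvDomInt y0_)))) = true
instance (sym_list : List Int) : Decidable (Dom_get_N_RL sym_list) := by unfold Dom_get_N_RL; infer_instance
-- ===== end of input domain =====

-- B replaces A's incrementally built dict-of-successor-sets by sort-then-scan: sort the source
-- components of the distinct transition pairs and take the longest run of equal values; objective: alternative.

-- ===== PORT A =====
-- A's loop body: try mapLocation[point].add(next) / except KeyError: mapLocation[point] = {next}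
def getNRLStepA (sym_list : List Int)
    (st : PySem.Dict Int (PySem.Set Int) × Int) (point : Int) :
    PySem.Dict Int (PySem.Set Int) × Int :=
  let idNextPoint := PySem.List.pyGetD sym_list (st.2 + 1) 0
  let m :=
    match st.1.get? point with
    | some s => st.1.insert point (PySem.Set.add s idNextPoint)
    | none   => st.1.insert point (PySem.Set.ofList [idNextPoint])
  (m, st.2 + 1)

def get_N_RL (sym_list : List Int) : Int :=
  let st :=
    (PySem.List.slice sym_list none (some (-1))).foldl (getNRLStepA sym_list)
      (PySem.Dict.empty, 0)
  st.1.values.foldl (fun N SetPoint =>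
    let nb : Int := PySem.Set.len SetPoint
    if nb > N then nb else N) 0

-- ===== PORT B =====
-- B's loop body: run = run+1 if x == prev else 1; best = max; prev = x
def bstep (st : Int × Int × Option Int) (x : Int) : Int × Int × Option Int :=
  let run := if some x == st.2.2 then st.2.1 + 1 else 1
  let best := if run > st.1 then run else st.1
  (best, run, some x)

def get_N_RL_alt (sym_list : List Int) : Int :=
  let srcs := PySem.List.sorted
      ((PySem.Set.ofList (sym_list.zip (PySem.List.slice sym_list (some 1) none))).map Prod.fst)
      (fun x => x) false
  let st := srcs.foldl bstep (0, 0, none)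
  st.1

-- ===== PRECONDITION & SPEC =====
def Spec_get_N_RL (sym_list : List Int) (out : Int) : Prop := out = get_N_RL_alt sym_list
instance (sym_list : List Int) (out : Int) : Decidable (Spec_get_N_RL sym_list out) := by unfold Spec_get_N_RL; infer_instance

-- ===== CLAIM (what is proved, stated in full; the proofs are below) =====
def Claim_equal_get_N_RL : Prop := ∀ (sym_list : List Int), Dom_get_N_RL sym_list → Spec_get_N_RL sym_list (get_N_RL sym_list)

-- ===== LEMMAS AND PROOFS =====
def succs (Q : List (Int × Int)) (x : Int) : List Int :=
  (Q.filter (fun p => p.1 == x)).map Prod.snd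

def buildStep (d : PySem.Dict Int (PySem.Set Int)) (p : Int × Int) :
    PySem.Dict Int (PySem.Set Int) :=
  match d.get? p.1 with
  | some s => d.insert p.1 (PySem.Set.add s p.2)
  | none   => d.insert p.1 (PySem.Set.ofList [p.2])

def buildA (Q : List (Int × Int)) : PySem.Dict Int (PySem.Set Int) :=
  Q.foldl buildStep PySem.Dict.empty

theorem buildStep_eq_insert (d : PySem.Dict Int (PySem.Set Int)) (p : Int × Int) :
    buildStep d p = d.insert p.1
      (match d.get? p.1 with
       | some s => PySem.Set.add s p.2
       | none   => PySem.Set.ofList [p.2]) := by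
  rw [buildStep]; cases d.get? p.1 <;> rfl

theorem buildA_keys (Q : List (Int × Int)) :
    (buildA Q).keys = PySem.Set.ofList (Q.map Prod.fst) := by
  rw [buildA]
  have h : Q.foldl buildStep PySem.Dict.empty =
      Q.foldl (fun d p => d.insert p.1
        (match d.get? p.1 with
         | some s => PySem.Set.add s p.2
         | none   => PySem.Set.ofList [p.2])) PySem.Dict.empty :=
    PySem.List.foldl_congr_mem Q _ _ _ (fun d p _ => buildStep_eq_insert d p)
  have h2 : (Q.foldl (fun d p => d.insert p.1
        (match d.get? p.1 with
         | some s => PySem.Set.add s p.2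
         | none   => PySem.Set.ofList [p.2])) PySem.Dict.empty).keys =
      PySem.Set.update (PySem.Dict.empty : PySem.Dict Int (PySem.Set Int)).keys
        (Q.map Prod.fst) :=
    PySem.Dict.keys_foldl_insert_key Q Prod.fst _ PySem.Dict.empty
  rw [h, h2]
  simp [PySem.Set.update_nil_left]

theorem buildA_keys_nodup (Q : List (Int × Int)) : (buildA Q).keys.Nodup := by
  rw [buildA_keys]; exact PySem.Set.nodup_ofList (xs := Q.map Prod.fst)

theorem filter_nil_of_not_mem {Q : List (Int × Int)} {x : Int}
    (hm : x ∉ Q.map Prod.fst) : List.filter (fun p => p.1 == x) Q = [] := by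
  apply List.filter_eq_nil_iff.mpr
  intro a ha hax
  exact hm (List.mem_map.mpr ⟨a, ha, by simpa using hax⟩)

theorem buildA_get? (Q : List (Int × Int)) (x : Int) :
    (buildA Q).get? x =
      if x ∈ Q.map Prod.fst then some (PySem.Set.ofList (succs Q x)) else none := by
  induction Q using List.reverseRecOn with
  | nil => simp [buildA, PySem.Dict.get?_empty]
  | append_singleton Q p ih =>
    rw [buildA, List.foldl_append, List.foldl_cons, List.foldl_nil, ← buildA]
    rw [buildStep_eq_insert, PySem.Dict.get?_insert]
    by_cases hx : x = p.1
    · rw [if_pos hx, ← hx, ih]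
      have hsx : succs (Q ++ [p]) x = succs Q x ++ [p.2] := by
        rw [succs, succs, List.filter_append]
        have : List.filter (fun q => q.1 == x) [p] = [p] := by
          simp [List.filter, hx]
        rw [this, List.map_append, List.map_cons, List.map_nil]
      have hmem : x ∈ (Q ++ [p]).map Prod.fst := by
        simp [hx]
      rw [if_pos hmem, hsx]
      by_cases hm : x ∈ Q.map Prod.fst
      · rw [if_pos hm]
        congr 1
        simp [PySem.Set.ofList_eq_foldl, List.foldl_append]
      · rw [if_neg hm]
        have hnil : succs Q x = [] := by
          rw [succs, filter_nil_of_not_mem hm, List.map_nil]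
        rw [hnil]
        simp
    · rw [if_neg hx, ih]
      have hpx : (p.1 == x) = false := beq_eq_false_iff_ne.mpr (Ne.symm hx)
      have hs : succs (Q ++ [p]) x = succs Q x := by
        rw [succs, succs, List.filter_append]
        have : List.filter (fun q => q.1 == x) [p] = [] := by
          simp [List.filter, hpx]
        simp [this]
      rw [hs]
      by_cases hm : x ∈ Q.map Prod.fst
      · rw [if_pos hm, if_pos (by simp [hm])]
      · rw [if_neg hm, if_neg (by simp [hm, hx])]

theorem A_loop (l : List Int) :
    ∀ (r : List Int) (c : Nat) (d : PySem.Dict Int (PySem.Set Int)),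
      r = l.dropLast.drop c →
      (r.foldl (getNRLStepA l) (d, (c : Int))).1 =
        ((l.zip l.tail).drop c).foldl buildStep d := by
  intro r
  induction r with
  | nil =>
    intro c d hr
    have hlen : l.dropLast.length ≤ c := by
      by_contra hlt
      push Not at hlt
      have := List.drop_eq_nil_iff.mp hr.symm
      omega
    have hz : (l.zip l.tail).drop c = [] := by
      apply List.drop_eq_nil_iff.mpr
      have h1 : (l.zip l.tail).length = min l.length l.tail.length := List.length_zip
      have h2 : l.dropLast.length = l.length - 1 := List.length_dropLast
      have h3 : l.tail.length = l.length - 1 := List.length_tail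
      omega
    simp [hz]
  | cons x r' ih =>
    intro c d hr
    have hc : c < l.dropLast.length := by
      by_contra hge
      push Not at hge
      rw [List.drop_eq_nil_of_le hge] at hr
      exact List.cons_ne_nil x r' hr
    have hcl : c < l.length - 1 := by
      simpa [List.length_dropLast] using hc
    have hx : x = l[c]'(by omega) := by
      have := List.drop_eq_getElem_cons (l := l.dropLast) (i := c) hc
      rw [this] at hr
      have hx' := (List.cons_eq_cons.mp hr.symm).1
      rw [← hx']
      exact List.getElem_dropLast _
    have hr' : r' = l.dropLast.drop (c + 1) := by
      have := List.drop_eq_getElem_cons (l := l.dropLast) (i := c) hc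
      rw [this] at hr
      exact (List.cons_eq_cons.mp hr.symm).2.symm
    have hstep : getNRLStepA l (d, (c : Int)) x =
        (buildStep d (l[c]'(by omega), l[c+1]'(by omega)), ((c + 1 : Nat) : Int)) := by
      rw [getNRLStepA, buildStep]
      have hget : PySem.List.pyGetD l ((c : Int) + 1) 0 = l[c+1]'(by omega) := by
        have : ((c : Int) + 1) = ((c + 1 : Nat) : Int) := by push_cast; ring
        rw [this, PySem.List.pyGetD_natCast]
        simp [List.getD_eq_getElem?_getD, List.getElem?_eq_getElem (by omega : c + 1 < l.length)]
      refine Prod.ext ?_ ?_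
      · simp only [hget, hx]
      · push_cast
        ring
    have hzc : (l.zip l.tail).drop c =
        (l[c]'(by omega), l[c+1]'(by omega)) :: (l.zip l.tail).drop (c+1) := by
      have hlz : c < (l.zip l.tail).length := by
        simp [List.length_zip, List.length_tail]
        omega
      rw [List.drop_eq_getElem_cons hlz]
      congr 1
      rw [List.getElem_zip]
      congr 1
      exact List.getElem_tail _
    rw [List.foldl_cons, hstep, hzc, List.foldl_cons]
    exact ih (c + 1) _ hr'

theorem A_as_fold (l : List Int) :
    get_N_RL l =
      ((PySem.Set.ofList ((l.zip l.tail).map Prod.fst)).map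
        (fun k => ((PySem.Set.ofList (succs (l.zip l.tail) k)).length : Int))).foldl max 0 := by
  rw [get_N_RL]
  have hsl : PySem.List.slice l none (some (-1)) = l.dropLast :=
    PySem.List.slice_to_neg_one l
  have hdrop : l.dropLast = l.dropLast.drop 0 := rfl
  have hA := A_loop l l.dropLast 0 PySem.Dict.empty hdrop
  simp only [List.drop_zero] at hA
  rw [hsl]
  rw [show ((0 : Int)) = ((0 : Nat) : Int) from rfl, hA, ← buildA]
  rw [PySem.Dict.values_eq_map_keys (buildA (l.zip l.tail)) (buildA_keys_nodup _) []]
  rw [buildA_keys]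
  have hmap : (PySem.Set.ofList ((l.zip l.tail).map Prod.fst)).map
        (fun k => (buildA (l.zip l.tail)).getD k []) =
      (PySem.Set.ofList ((l.zip l.tail).map Prod.fst)).map
        (fun k => PySem.Set.ofList (succs (l.zip l.tail) k)) := by
    apply List.map_congr_left
    intro k hk
    have hkmem : k ∈ (l.zip l.tail).map Prod.fst := (PySem.Set.mem_ofList _ _).mp hk
    rw [PySem.Dict.getD_eq_get?_getD, buildA_get?, if_pos hkmem]
    rfl
  rw [hmap, List.foldl_map, List.foldl_map]
  apply PySem.List.foldl_congr_mem
  intro N k _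
  dsimp only
  simp only [PySem.Set.len]
  rw [max_def]
  split_ifs <;> omega

theorem len_ofList (l : List Int) :
    (PySem.Set.ofList l).length = l.toFinset.card := by
  have hnd := PySem.Set.nodup_ofList (xs := l)
  have h1 : (PySem.Set.ofList l).toFinset = l.toFinset := by
    ext a; simp [PySem.Set.mem_ofList]
  rw [← List.toFinset_card_of_nodup hnd, h1]

theorem count_eq_len (P : List (Int × Int)) (x : Int) :
    (((PySem.Set.ofList P).map Prod.fst).count x : Int) =
      ((PySem.Set.ofList (succs P x)).length : Int) := by
  have hq : ∀ Q : List (Int × Int),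
      (PySem.Set.ofList (succs Q x)).length = (Q.filter (fun p => p.1 == x)).toFinset.card := by
    intro Q
    rw [succs]
    have := len_ofList ((Q.filter (fun p => p.1 == x)).map Prod.snd)
    rw [this, show ((Q.filter (fun p => p.1 == x)).map Prod.snd).toFinset = (Q.filter (fun p => p.1 == x)).toFinset.image Prod.snd from by ext a; simp, Finset.card_image_of_injOn]
    intro a ha b hb hab
    simp [List.mem_toFinset] at ha hb
    exact Prod.ext (ha.2.trans hb.2.symm) hab
  have hL : ((PySem.Set.ofList P).map Prod.fst).count x
      = ((PySem.Set.ofList P).filter (fun p => p.1 == x)).length := by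
    rw [List.count, List.countP_map, List.countP_eq_length_filter]
    rfl
  have hnd : ((PySem.Set.ofList P).filter (fun p => p.1 == x)).Nodup :=
    (PySem.Set.nodup_ofList (xs := P)).filter _
  have hmem : ((PySem.Set.ofList P).filter (fun p => p.1 == x)).toFinset
      = (P.filter (fun p => p.1 == x)).toFinset := by
    ext a; simp [PySem.Set.mem_ofList]
  rw [hL, hq P, ← List.toFinset_card_of_nodup hnd, hmem]

-- max-run bookkeeping for B's scan
def runM (ys : List Int) (p : Option Int) (r : Int) : Int :=
  ys.toFinset.fold max 0 (fun k => (ys.count k : Int) + if some k = p then r else 0)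

theorem foldl_max_shift (l : List Int) :
    ∀ b c : Int, l.foldl max (max b c) = max c (l.foldl max b) := by
  induction l with
  | nil => intro b c; simp [max_comm]
  | cons y l ih =>
    intro b c
    simp only [List.foldl_cons]
    rw [show max (max b c) y = max (max b y) c from by rw [max_right_comm], ih]

theorem foldl_max_toFinset (d : List Int) (f : Int → Int) (b : Int) (h : d.Nodup) :
    (d.map f).foldl max b = d.toFinset.fold max b f := by
  induction d generalizing b with
  | nil => simp
  | cons a d ih =>
    have hnd := List.nodup_cons.mp h
    rw [List.map_cons, List.foldl_cons, List.toFinset_cons,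
      Finset.fold_insert (by simpa using hnd.1), ← ih _ hnd.2, foldl_max_shift]

theorem run_absorb (ys : List Int) (x r' : Int) :
    max ((ys.count x : Int) + r')
      (ys.toFinset.fold max 0 (fun k => (ys.count k : Int) + if k = x then r' else 0)) =
    max r'
      (ys.toFinset.fold max 0 (fun k => (ys.count k : Int) + if k = x then r' else 0)) := by
  by_cases hx : x ∈ ys
  · have hle : ((ys.count x : Int) + r') ≤
        ys.toFinset.fold max 0 (fun k => (ys.count k : Int) + if k = x then r' else 0) := by
      exact (Finset.le_fold_max _).mpr (Or.inr ⟨x, List.mem_toFinset.mpr hx, by simp⟩)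
    have hc : (0 : Int) ≤ (ys.count x : Int) := by positivity
    rw [max_eq_right hle, max_eq_right (by omega)]
  · rw [List.count_eq_zero_of_not_mem hx]
    norm_num

theorem runM_cons (x : Int) (ys : List Int) (p : Option Int) (r : Int)
    (hxy : ∀ y ∈ ys, x ≤ y) (hp : ∀ q, p = some q → q ≤ x) :
    runM (x :: ys) p r =
      max (if some x = p then r + 1 else 1)
        (runM ys (some x) (if some x = p then r + 1 else 1)) := by
  set r' : Int := if some x = p then r + 1 else 1 with hr'
  have hpt : ∀ k, (k = x ∨ k ∈ ys) →
      (((x :: ys).count k : Int) + if some k = p then r else 0) =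
      ((ys.count k : Int) + if k = x then r' else 0) := by
    intro k hk
    by_cases hkx : k = x
    · subst hkx
      rw [List.count_cons_self, hr']
      by_cases hxp : some k = p
      · rw [if_pos hxp, if_pos hxp, if_pos rfl]; push_cast; ring
      · rw [if_neg hxp, if_neg hxp, if_pos rfl]; push_cast; ring
    · have hky : k ∈ ys := hk.resolve_left hkx
      have hkp : some k ≠ p := by
        intro hkp
        have h1 : k ≤ x := hp k hkp.symm
        have h2 : x ≤ k := hxy k hky
        exact hkx (le_antisymm h1 h2)
      rw [if_neg hkp, if_neg hkx]
      have : (x :: ys).count k = ys.count k := by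
        rw [List.count_cons]
        simp [Ne.symm hkx]
      rw [this]
  rw [runM, List.toFinset_cons, Finset.fold_insert_idem]
  have hcong : ys.toFinset.fold max 0
        (fun k => (((x :: ys).count k : Int) + if some k = p then r else 0)) =
      ys.toFinset.fold max 0 (fun k => ((ys.count k : Int) + if k = x then r' else 0)) := by
    apply Finset.fold_congr
    intro k hk
    exact hpt k (Or.inr (List.mem_toFinset.mp hk))
  rw [hcong, hpt x (Or.inl rfl), if_pos rfl, run_absorb, runM]
  have hcong2 : ys.toFinset.fold max 0
        (fun k => ((ys.count k : Int) + if some k = some x then r' else 0)) =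
      ys.toFinset.fold max 0 (fun k => ((ys.count k : Int) + if k = x then r' else 0)) := by
    apply Finset.fold_congr
    intro k _
    simp
  rw [hcong2]

theorem runG (ys : List Int) (hpw : ys.Pairwise (· ≤ ·)) :
    ∀ (b r : Int) (p : Option Int), 0 ≤ b →
      (∀ y ∈ ys, ∀ q, p = some q → q ≤ y) →
      (ys.foldl bstep (b, r, p)).1 = max b (runM ys p r) := by
  induction ys with
  | nil =>
    intro b r p hb _
    simp only [List.foldl_nil, runM, List.toFinset_nil, Finset.fold_empty]
    omega
  | cons x ys ih =>
    intro b r p hb hinv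
    have hxy : ∀ y ∈ ys, x ≤ y := (List.pairwise_cons.mp hpw).1
    have hpw' := (List.pairwise_cons.mp hpw).2
    rw [List.foldl_cons]
    have hstep : bstep (b, r, p) x =
        (max b (if some x = p then r + 1 else 1), (if some x = p then r + 1 else 1), some x) := by
      rw [bstep]
      simp only [beq_iff_eq]
      refine Prod.ext ?_ rfl
      dsimp only
      rw [max_def]
      split_ifs <;> omega
    rw [hstep, ih hpw' _ _ _ (by omega) (by intro y hy q hq; cases hq; exact hxy y hy)]
    rw [runM_cons x ys p r hxy (fun q hq => hinv x List.mem_cons_self q hq), max_assoc]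

theorem B_as_count (l : List Int) :
    get_N_RL_alt l =
      (((PySem.Set.ofList (l.zip l.tail)).map Prod.fst).toFinset.fold max 0
        (fun k => (((PySem.Set.ofList (l.zip l.tail)).map Prod.fst).count k : Int))) := by
  simp only [get_N_RL_alt, PySem.List.slice_from_one]
  set ws := (PySem.Set.ofList (l.zip l.tail)).map Prod.fst with hws
  set srcs := PySem.List.sorted ws (fun x => x) false with hsrcs
  have hpw : srcs.Pairwise (· ≤ ·) := PySem.List.sorted_pairwise ws (fun x => x)
  have hperm : srcs.Perm ws := PySem.List.sorted_perm ws (fun x => x) false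
  rw [runG srcs hpw 0 0 none (le_refl 0) (by intro y _ q hq; cases hq)]
  have hM : runM srcs none 0 =
      ws.toFinset.fold max 0 (fun k => ((ws.count k : Int))) := by
    have hfe : srcs.toFinset = ws.toFinset := by
      ext a; simp [List.mem_toFinset, hperm.mem_iff]
    rw [runM, hfe]
    apply Finset.fold_congr
    intro k _
    rw [hperm.count_eq]
    simp
  rw [hM]
  apply max_eq_right
  exact (Finset.le_fold_max _).mpr (Or.inl (le_refl 0))

theorem main_eq (l : List Int) : get_N_RL l = get_N_RL_alt l := by
  rw [A_as_fold, B_as_count]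
  set P := l.zip l.tail with hP
  set ws := (PySem.Set.ofList P).map Prod.fst with hws
  have hmapeq : (PySem.Set.ofList (P.map Prod.fst)).map
        (fun k => ((PySem.Set.ofList (succs P k)).length : Int)) =
      (PySem.Set.ofList (P.map Prod.fst)).map (fun k => ((ws.count k : Int))) := by
    apply List.map_congr_left
    intro k _
    rw [← count_eq_len P k]
  rw [hmapeq, foldl_max_toFinset _ _ _ (PySem.Set.nodup_ofList (xs := P.map Prod.fst))]
  have hfin : (PySem.Set.ofList (P.map Prod.fst)).toFinset = ws.toFinset := by
    ext a
    simp [PySem.Set.mem_ofList, hws]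
  rw [hfin]

-- ===== VERDICT (by name: the statement is the Claim_ definition above) =====
theorem get_N_RL_spec : Claim_equal_get_N_RL := by
  intro sym_list _
  unfold Spec_get_N_RL
  exact main_eq sym_list
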